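-- pv_equiv track=rewrite | github.com/septimium/bioinformatics | Project_L8/assign1.py | find_restriction_sites
-- ===== SOURCE A (Python) =====
-- def find_restriction_sites(sequence, enzyme_name, recognition_seq, cut_position):
--     cut_positions = []
--     seq_upper = sequence.upper()
--
--     start = 0
--     while True:
--         pos = seq_upper.find(recognition_seq, start)
--         if pos == -1:
--             break
--         cut_pos = pos + cut_position
--         cut_positions.append(cut_pos)
--         start = pos + 1
--
--     return sorted(cut_positions)
-- ===== SOURCE B (Python) =====
-- def find_restriction_sites(sequence, enzyme_name, recognition_seq, cut_position):
--     # Column-wise candidate filtering: start from all window positions and,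
--     # for each pattern column j, keep only candidates whose j-th character matches.
--     seq_upper = sequence.upper()
--     candidates = list(range(len(seq_upper) - len(recognition_seq) + 1))
--     for j, ch in enumerate(recognition_seq):
--         candidates = [i for i in candidates if seq_upper[i + j] == ch]
--     return [i + cut_position for i in candidates]
-- ===== Notes on version B (the rewrite author's own statement) =====
-- stated objective: alternative
-- what changed: B replaces A's stateful str.find jump loop plus a final sorted() by column-wise candidate filtering: it starts from the list of all window positions and, for each pattern character in turn, filters the candidate list by that single column, so no window slice is compared as a whole and no sort is needed.
import Mathlib
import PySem

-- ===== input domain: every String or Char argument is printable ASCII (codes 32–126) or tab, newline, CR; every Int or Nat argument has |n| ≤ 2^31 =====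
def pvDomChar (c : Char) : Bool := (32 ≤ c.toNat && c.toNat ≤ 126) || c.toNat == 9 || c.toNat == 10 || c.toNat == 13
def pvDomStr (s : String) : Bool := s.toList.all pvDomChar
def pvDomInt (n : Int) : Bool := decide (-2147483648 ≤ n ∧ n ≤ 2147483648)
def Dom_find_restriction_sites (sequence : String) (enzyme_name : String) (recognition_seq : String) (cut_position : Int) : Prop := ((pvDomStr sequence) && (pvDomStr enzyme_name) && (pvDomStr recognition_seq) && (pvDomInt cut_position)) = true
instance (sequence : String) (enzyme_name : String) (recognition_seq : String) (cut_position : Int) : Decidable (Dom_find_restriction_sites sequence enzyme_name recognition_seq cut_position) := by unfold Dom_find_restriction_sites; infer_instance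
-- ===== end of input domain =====

-- B replaces A's stateful str.find jump loop + final sort by column-wise candidate filtering
-- (start from all window positions, narrow the candidate list one pattern column at a time);
-- same results, same cost class.

-- ===== PORT A =====
-- A-side helper: the "while True: pos = seq_upper.find(recognition_seq, start)" loop as
-- fuel-bounded structural recursion (fuel = len(seq_upper)+1 suffices: start strictly increases).
def pvLoopA (up sub : List Char) (cut : Int) (start : Nat) (fuel : Nat) : List Int :=
  match fuel with
  | 0 => []
  | Nat.succ fuel =>
    let pos := PySem.Chars.findFrom up sub (start : Int) none
    if pos = -1 then []
    else (pos + cut) :: pvLoopA up sub cut (pos.toNat + 1) fuel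

def find_restriction_sites (sequence : String) (enzyme_name : String) (recognition_seq : String) (cut_position : Int) : List Int :=
  let seq_upper := PySem.Str.upper sequence
  let cut_positions :=
    pvLoopA seq_upper.toList recognition_seq.toList cut_position 0 (seq_upper.toList.length + 1)
  PySem.List.sorted cut_positions (fun x => x)

-- ===== PORT B =====
def find_restriction_sites_alt (sequence : String) (enzyme_name : String) (recognition_seq : String) (cut_position : Int) : List Int :=
  let seq_upper := PySem.Str.upper sequence
  let up := seq_upper.toList
  -- candidates = list(range(len(seq_upper) - len(recognition_seq) + 1))
  let candidates0 :=
    PySem.List.pyRange 0 (PySem.Chars.len up - PySem.Chars.len recognition_seq.toList + 1) 1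
  -- for j, ch in enumerate(recognition_seq): candidates = [i for i in candidates if seq_upper[i + j] == ch]
  let candidates :=
    (PySem.List.enumerate recognition_seq.toList 0).foldl
      (fun cs (p : Int × Char) =>
        cs.filter (fun i => PySem.List.pyGet? up (i + p.1) == some p.2))
      candidates0
  candidates.map (fun i => i + cut_position)

-- ===== PRECONDITION & SPEC =====
def Spec_find_restriction_sites (sequence : String) (enzyme_name : String) (recognition_seq : String) (cut_position : Int) (out : List Int) : Prop := out = find_restriction_sites_alt sequence enzyme_name recognition_seq cut_position
instance (sequence : String) (enzyme_name : String) (recognition_seq : String) (cut_position : Int) (out : List Int) : Decidable (Spec_find_restriction_sites sequence enzyme_name recognition_seq cut_position out) := by unfold Spec_find_restriction_sites; infer_instance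

-- ===== CLAIM (what is proved, stated in full; the proofs are below) =====
def Claim_equal_find_restriction_sites : Prop := ∀ (sequence : String) (enzyme_name : String) (recognition_seq : String) (cut_position : Int), Dom_find_restriction_sites sequence enzyme_name recognition_seq cut_position → Spec_find_restriction_sites sequence enzyme_name recognition_seq cut_position (find_restriction_sites sequence enzyme_name recognition_seq cut_position)

-- ===== LEMMAS AND PROOFS =====

-- the common normal form both ports are reduced to: all match positions in ascending order, shifted by cut
def pvCanon (up sub : List Char) (cut : Int) : List Int :=
  ((List.range (up.length + 1)).filter (fun i => decide (sub <+: up.drop i))).map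
    (fun (i : Nat) => (i : Int) + cut)

-- str.find(sub, start) with start past the end returns -1 (even for sub = '')
theorem pvFindFrom_past (s sub : List Char) (k : Int) (h : (s.length : Int) < k) :
    PySem.Chars.findFrom s sub k none = -1 := by
  simp only [PySem.Chars.findFrom]
  have h0 : ¬ (k < 0) := by omega
  simp only [h0, if_false]
  rw [if_pos h]

-- the find-jump loop collects exactly the match positions ≥ k, in increasing order
theorem pvLoopA_eq (up sub : List Char) (cut : Int) :
    ∀ (fuel k : Nat), k ≤ up.length + 1 → up.length + 1 ≤ k + fuel →
      pvLoopA up sub cut k fuel =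
        ((List.range' k (up.length + 1 - k)).filter (fun i => decide (sub <+: up.drop i))).map
          (fun (i : Nat) => (i : Int) + cut) := by
  intro fuel
  induction fuel with
  | zero =>
    intro k hk hf
    have : up.length + 1 - k = 0 := by omega
    simp [pvLoopA, this]
  | succ fuel ih =>
    intro k hk hf
    by_cases hk' : k ≤ up.length
    · by_cases hpos : PySem.Chars.findFrom up sub (k : Int) none = -1
      · -- no further match: the filtered tail range is empty
        have hninf : ¬ sub <:+: up.drop k :=
          (PySem.Chars.findFrom_natCast_eq_neg_one_iff up sub k hk').mp hpos
        have hfil : ((List.range' k (up.length + 1 - k)).filter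
            (fun i => decide (sub <+: up.drop i))) = [] := by
          rw [List.filter_eq_nil_iff]
          intro i hi
          rw [List.mem_range'_1] at hi
          simp only [decide_eq_true_eq]
          intro hpre
          apply hninf
          rw [← (PySem.Chars.isIn_iff_infix sub (up.drop k))]
          rw [← PySem.Chars.exists_prefix_drop_iff_isIn]
          refine ⟨i - k, ?_⟩
          rw [List.drop_drop, show k + (i - k) = i from by omega]
          exact hpre
        simp [pvLoopA, hpos, hfil]
      · -- a match at pos: split the range at pos, recurse from pos+1
        obtain ⟨hge, hpre, hmin⟩ := PySem.Chars.findFrom_natCast_spec up sub k hk' hpos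
        set pos := PySem.Chars.findFrom up sub (k : Int) none with hposdef
        have hle : pos ≤ (up.length : Int) := by
          rw [hposdef, PySem.Chars.findFrom_natCast up sub k hk']
          have := PySem.Chars.find_le_length (up.drop k) sub
          simp only [List.length_drop] at this
          split
          · omega
          · omega
        set p := pos.toNat with hpdef
        have hposp : pos = (p : Int) := by omega
        have hkp : k ≤ p := by omega
        have hpn : p ≤ up.length := by omega
        have hsplit : List.range' k (up.length + 1 - k) =
            List.range' k (p - k) ++ (p :: List.range' (p + 1) (up.length - p)) := by
          have h1 : (p :: List.range' (p + 1) (up.length - p)) =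
              List.range' p (up.length - p + 1) := by
            rw [List.range'_succ]
          rw [h1]
          have := @List.range'_append k (p - k) (up.length - p + 1) 1
          simp only [one_mul] at this
          rw [show k + (p - k) = p by omega] at this
          rw [show p - k + (up.length - p + 1) = up.length + 1 - k by omega] at this
          exact this.symm
        have hfil1 : (List.range' k (p - k)).filter (fun i => decide (sub <+: up.drop i)) = [] := by
          rw [List.filter_eq_nil_iff]
          intro i hi
          rw [List.mem_range'_1] at hi
          simp only [decide_eq_true_eq]
          exact hmin i hi.1 (by omega)
        have lhs : pvLoopA up sub cut k (fuel + 1) =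
            (pos + cut) :: pvLoopA up sub cut (p + 1) fuel := by
          simp only [pvLoopA]
          rw [if_neg hpos]
        rw [lhs, hsplit, List.filter_append, hfil1, List.nil_append,
          List.filter_cons, if_pos (by simp [hpre]), List.map_cons]
        rw [ih (p + 1) (by omega) (by omega)]
        rw [show up.length + 1 - (p + 1) = up.length - p from by omega]
        rw [hposp]
    · -- start past the end: str.find returns -1 even for the empty pattern
      have hfind : PySem.Chars.findFrom up sub (k : Int) none = -1 :=
        pvFindFrom_past up sub k (by omega)
      have hz : up.length + 1 - k = 0 := by omega
      simp [pvLoopA, hfind, hz]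

theorem pvA_eq_canon (sequence recognition_seq : String) (cut : Int) (enzyme_name : String) :
    find_restriction_sites sequence enzyme_name recognition_seq cut =
      pvCanon (PySem.Str.upper sequence).toList recognition_seq.toList cut := by
  dsimp only [find_restriction_sites]
  set up := (PySem.Str.upper sequence).toList with hup
  have h1 : pvLoopA up recognition_seq.toList cut 0 (up.length + 1) =
      pvCanon up recognition_seq.toList cut := by
    rw [pvLoopA_eq up recognition_seq.toList cut (up.length + 1) 0 (by omega) (by omega)]
    unfold pvCanon
    rw [List.range_eq_range']
    norm_num
  rw [h1]
  apply PySem.List.sorted_eq_self_of_pairwise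
  unfold pvCanon
  apply List.Pairwise.map
  · intro a b (hab : a < b)
    omega
  · exact (List.pairwise_lt_range.sublist List.filter_sublist)

-- a left fold of filters is one filter by the conjunction of all the column predicates
theorem pvFoldlFilter (ps : List (Int × Char)) (cs : List Int) (p : Int × Char → Int → Bool) :
    ps.foldl (fun cs q => cs.filter (p q)) cs
      = cs.filter (fun i => ps.all (fun q => p q i)) := by
  induction ps generalizing cs with
  | nil => simp
  | cons q ps ih =>
    rw [List.foldl_cons, ih, List.filter_filter]
    apply List.filter_congr
    intro i _
    simp [Bool.and_comm]

-- matching every pattern column at window i is exactly the prefix test on the suffix at i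
theorem pvAll_eq_prefix (sub up : List Char) (i : Nat) (h : i + sub.length ≤ up.length) :
    ((PySem.List.enumerate sub 0).all
        (fun q => PySem.List.pyGet? up ((i : Int) + q.1) == some q.2))
      = decide (sub <+: up.drop i) := by
  rw [Bool.eq_iff_iff]
  simp only [List.all_eq_true, decide_eq_true_eq, beq_iff_eq]
  constructor
  · intro hall
    rw [List.prefix_iff_eq_take]
    apply List.ext_getElem
    · simp; omega
    · intro k hk1 hk2
      have hk : k < sub.length := by simpa using hk1
      have := hall (0 + (k : Int), sub[k])
        ((PySem.List.mem_enumerate_iff _ _ _).mpr ⟨k, hk, rfl⟩)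
      have hcast : (i : Int) + (0 + (k : Int)) = ((i + k : Nat) : Int) := by push_cast; ring
      rw [hcast, PySem.List.pyGet?_natCast] at this
      have hik : i + k < up.length := by omega
      simp only [List.getElem?_eq_getElem hik, Option.some.injEq] at this
      simp [List.getElem_take, List.getElem_drop, this]
  · intro hpre q hq
    obtain ⟨k, hk, rfl⟩ := (PySem.List.mem_enumerate_iff _ _ _).mp hq
    have hcast : (i : Int) + (0 + (k : Int)) = ((i + k : Nat) : Int) := by push_cast; ring
    rw [hcast, PySem.List.pyGet?_natCast]
    have hik : i + k < up.length := by omega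
    rw [List.getElem?_eq_getElem hik, Option.some.injEq]
    have hpk := List.IsPrefix.getElem hpre hk
    show up[i + k] = sub[k]
    rw [hpk]
    simp [List.getElem_drop]

theorem pvB_eq_canon (sequence recognition_seq : String) (cut : Int) (enzyme_name : String) :
    find_restriction_sites_alt sequence enzyme_name recognition_seq cut =
      pvCanon (PySem.Str.upper sequence).toList recognition_seq.toList cut := by
  dsimp only [find_restriction_sites_alt]
  set up := (PySem.Str.upper sequence).toList with hup
  set sub := recognition_seq.toList with hsub
  rw [pvFoldlFilter]
  rw [PySem.Chars.len_eq, PySem.Chars.len_eq, PySem.List.pyRange_one, List.filter_map,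
    List.map_map]
  set N := (((up.length : Int) - (sub.length : Int) + 1) - 0).toNat with hNdef
  have hN : N ≤ up.length + 1 := by omega
  have hpred : ∀ j ∈ List.range N,
      ((fun i => (PySem.List.enumerate sub 0).all
          (fun q => PySem.List.pyGet? up (i + q.1) == some q.2)) ∘
        (fun k : Nat => (0 : Int) + (k : Int))) j
      = decide (sub <+: up.drop j) := by
    intro j hj
    rw [List.mem_range] at hj
    simp only [Function.comp, zero_add]
    exact pvAll_eq_prefix sub up j (by omega)
  rw [List.filter_congr hpred]
  have hfil : (List.range N).filter (fun i => decide (sub <+: up.drop i))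
      = (List.range (up.length + 1)).filter (fun i => decide (sub <+: up.drop i)) := by
    have hsplit : List.range (up.length + 1) =
        List.range N ++ List.range' N (up.length + 1 - N) := by
      rw [List.range_eq_range', List.range_eq_range']
      have := @List.range'_append 0 N (up.length + 1 - N) 1
      simp only [one_mul, Nat.zero_add] at this
      rw [show N + (up.length + 1 - N) = up.length + 1 from by omega] at this
      exact this.symm
    rw [hsplit, List.filter_append]
    have h2 : (List.range' N (up.length + 1 - N)).filter
        (fun i => decide (sub <+: up.drop i)) = [] := by
      rw [List.filter_eq_nil_iff]
      intro i hi
      rw [List.mem_range'_1] at hi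
      simp only [decide_eq_true_eq]
      intro hpre
      have hl := hpre.length_le
      simp only [List.length_drop] at hl
      omega
    rw [h2, List.append_nil]
  rw [hfil]
  simp [pvCanon, Function.comp]

-- ===== VERDICT (by name: the statement is the Claim_ definition above) =====
theorem find_restriction_sites_spec : Claim_equal_find_restriction_sites := by
  intro sequence enzyme_name recognition_seq cut_position _
  unfold Spec_find_restriction_sites
  rw [pvA_eq_canon, pvB_eq_canon]
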